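-- pv_equiv track=rewrite | github.com/alexandreffaria/AutostockUtils | archive/quickRemoveQuotes.py | remove_quotes_and_commas_from_title
-- ===== SOURCE A (Python) =====
-- def remove_quotes_and_commas_from_title(line):
--     # Check if the line is not empty or contains only whitespace
--     if line.strip():
--         # Initialize variables for quotes and commas
--         quote_count = 0
--         comma_between_quotes = False
--
--         # Process each character in the line
--         i = 0
--         while i < len(line):
--             char = line[i]
--
--             # If the character is a double quote, remove it
--             if char == '"':
--                 quote_count += 1
--                 if quote_count <= 2:
--                     line = line[:i] + line[i + 1 :]
--                     if quote_count == 2: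
--                         comma_between_quotes = (
--                             False  # Reset flag after the second quote
--                         )
--                 else:
--                     i += 1  # Skip to the next character after the second quote
--             # If the character is a comma between the first and second quotes, remove it
--             elif char == "," and quote_count == 1:
--                 line = line[:i] + line[i + 1 :]
--                 comma_between_quotes = True
--             else:
--                 i += 1
--
--         # If there was a comma between the quotes, add a space after the second quote
--         if comma_between_quotes:
--             line = line.replace('"', '" ')
--
--         # Write the modified line to the output file
--         return line
--
--     return line
-- ===== SOURCE B (Python) =====
-- def remove_quotes_and_commas_from_title(line):
--     before, q, rest = line.partition('"')
--     if not q: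
--         return line
--     mid, _q2, after = rest.partition('"')
--     return before + mid.replace(',', '') + after
-- ===== Notes on version B (the rewrite author's own statement) =====
-- stated objective: faster
-- what changed: Replaces the stateful char-by-char while loop (with in-place string deletions, a quote counter and a comma flag, plus a provably dead trailing replace) by two partition calls at the quote positions and a single comma-strip of the middle slice.
import Mathlib
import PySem

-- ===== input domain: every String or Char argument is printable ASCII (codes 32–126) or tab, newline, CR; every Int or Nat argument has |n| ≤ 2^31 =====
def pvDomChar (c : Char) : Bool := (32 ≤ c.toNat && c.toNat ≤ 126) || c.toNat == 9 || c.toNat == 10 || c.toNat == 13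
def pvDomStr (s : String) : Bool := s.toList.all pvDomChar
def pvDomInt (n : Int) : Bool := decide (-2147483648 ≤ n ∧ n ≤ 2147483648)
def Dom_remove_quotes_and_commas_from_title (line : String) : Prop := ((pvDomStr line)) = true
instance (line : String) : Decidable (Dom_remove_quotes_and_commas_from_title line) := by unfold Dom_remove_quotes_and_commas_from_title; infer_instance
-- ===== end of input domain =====

-- B replaces A's stateful char-by-char deletion loop by two partition-at-quote slices
-- and one comma-strip of the middle slice (objective: simpler).

-- ===== PORT A =====
-- the while loop of A: state = (current line, index i, quote_count, comma_between_quotes)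
def aLoop (cs : List Char) (i : Nat) (qc : Nat) (flag : Bool) : List Char × Bool :=
  if h : i < cs.length then
    let c := cs[i]
    if c = '"' then
      if qc + 1 ≤ 2 then
        aLoop (cs.take i ++ cs.drop (i + 1)) i (qc + 1) (if qc + 1 = 2 then false else flag)
      else
        aLoop cs (i + 1) (qc + 1) flag
    else if c = ',' ∧ qc = 1 then
      aLoop (cs.take i ++ cs.drop (i + 1)) i qc true
    else
      aLoop cs (i + 1) qc flag
  else (cs, flag)
termination_by cs.length - i
decreasing_by
  · simp only [List.length_append, List.length_take, List.length_drop]; omega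
  · omega
  · simp only [List.length_append, List.length_take, List.length_drop]; omega
  · omega

def remove_quotes_and_commas_from_title (line : String) : String :=
  -- 'if line.strip():' = Python truthiness: the stripped string is nonempty
  if PySem.Chars.strip line.toList ≠ [] then
    let r := aLoop line.toList 0 0 false
    if r.2 then String.ofList (PySem.Chars.replace r.1 ['"'] ['"', ' ']) else String.ofList r.1
  else line

-- ===== PORT B =====
-- str.partition('"') ported by hand (exact for a single-character separator):
-- (takeWhile (≠ sep), the rest starting at sep or []).
def remove_quotes_and_commas_from_title_alt (line : String) : String :=
  let cs := line.toList
  let before := cs.takeWhile (· ≠ '"')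
  match cs.dropWhile (· ≠ '"') with
  | [] => line                        -- 'if not q: return line'
  | _ :: rest =>
    let mid := rest.takeWhile (· ≠ '"')
    let after := (rest.dropWhile (· ≠ '"')).drop 1
    -- mid.replace(',', '') for the 1-char pattern = filter (≠ ',')
    String.ofList (before ++ mid.filter (· ≠ ',') ++ after)

-- ===== PRECONDITION & SPEC =====
def Spec_remove_quotes_and_commas_from_title (line : String) (out : String) : Prop := out = remove_quotes_and_commas_from_title_alt line
instance (line : String) (out : String) : Decidable (Spec_remove_quotes_and_commas_from_title line out) := by unfold Spec_remove_quotes_and_commas_from_title; infer_instance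

-- ===== CLAIM (what is proved, stated in full; the proofs are below) =====
def Claim_equal_remove_quotes_and_commas_from_title : Prop := ∀ (line : String), Dom_remove_quotes_and_commas_from_title line → Spec_remove_quotes_and_commas_from_title line (remove_quotes_and_commas_from_title line)

-- ===== LEMMAS AND PROOFS =====

-- the result of the loop once quote_count = 1 (first quote already removed):
-- commas stripped up to the next quote, that quote removed, tail kept;
-- flag true only if no second quote exists and a comma was removed
def phase1 (suf : List Char) (flag : Bool) : List Char × Bool :=
  ((suf.takeWhile (· ≠ '"')).filter (· ≠ ',') ++ (suf.dropWhile (· ≠ '"')).drop 1,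
   if suf.dropWhile (· ≠ '"') = [] then flag || suf.any (· == ',') else false)

lemma takeDropMid (pre t : List Char) (c : Char) :
    (pre ++ c :: t).take pre.length ++ (pre ++ c :: t).drop (pre.length + 1) = pre ++ t := by
  have h1 : (pre ++ c :: t).take pre.length = pre := by
    rw [List.take_append_of_le_length (by simp)]
    simp
  have h2 : (pre ++ c :: t).drop (pre.length + 1) = t := by
    rw [show pre.length + 1 = (pre ++ [c]).length by simp, show pre ++ c :: t = (pre ++ [c]) ++ t by simp,
        List.drop_left]
  rw [h1, h2]

lemma aLoop_ge_two : ∀ (suf pre : List Char) (qc : Nat) (flag : Bool), 2 ≤ qc →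
    aLoop (pre ++ suf) pre.length qc flag = (pre ++ suf, flag) := by
  intro suf
  induction suf with
  | nil => intro pre qc flag h; rw [aLoop]; simp
  | cons c t ih =>
    intro pre qc flag h
    rw [aLoop]
    have hlen : pre.length < (pre ++ c :: t).length := by simp
    have hget : (pre ++ c :: t)[pre.length]'hlen = c := by
      simp [List.getElem_append_right]
    simp only [hlen, dif_pos, hget]
    by_cases hc : c = '"'
    · subst hc
      rw [if_pos rfl, if_neg (by omega : ¬ qc + 1 ≤ 2)]
      have h1 := ih (pre ++ ['"']) (qc + 1) flag (by omega)
      simpa using h1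
    · rw [if_neg hc, if_neg (by rintro ⟨_, h1⟩; omega : ¬ (c = ',' ∧ qc = 1))]
      have h1 := ih (pre ++ [c]) qc flag h
      simpa using h1

lemma aLoop_one : ∀ (suf pre : List Char) (flag : Bool),
    aLoop (pre ++ suf) pre.length 1 flag = (pre ++ (phase1 suf flag).1, (phase1 suf flag).2) := by
  intro suf
  induction suf with
  | nil => intro pre flag; rw [aLoop]; simp [phase1]
  | cons c t ih =>
    intro pre flag
    rw [aLoop]
    have hlen : pre.length < (pre ++ c :: t).length := by simp
    have hget : (pre ++ c :: t)[pre.length]'hlen = c := by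
      simp [List.getElem_append_right]
    simp only [hlen, dif_pos, hget]
    by_cases hc : c = '"'
    · subst hc
      rw [if_pos rfl, if_pos (by norm_num : (1:Nat) + 1 ≤ 2), takeDropMid, if_pos trivial,
          aLoop_ge_two t pre (1 + 1) false (by norm_num)]
      simp [phase1]
    · by_cases hcomma : c = ','
      · rw [if_neg hc, if_pos ⟨hcomma, trivial⟩, takeDropMid, ih pre true]
        subst hcomma
        simp [phase1]
      · rw [if_neg hc, if_neg (by rintro ⟨h1, _⟩; exact hcomma h1)]
        have h1 := ih (pre ++ [c]) flag
        simp only [List.append_assoc, List.singleton_append, List.length_append,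
          List.length_singleton] at h1
        rw [h1]
        have hb : (c == ',') = false := by simp [hcomma]
        simp [phase1, List.takeWhile_cons, List.dropWhile_cons, hc, hcomma, hb]

lemma aLoop_zero : ∀ (suf pre : List Char) (flag : Bool),
    aLoop (pre ++ suf) pre.length 0 flag =
      (match suf.dropWhile (· ≠ '"') with
       | [] => (pre ++ suf, flag)
       | _ :: t => (pre ++ suf.takeWhile (· ≠ '"') ++ (phase1 t flag).1, (phase1 t flag).2)) := by
  intro suf
  induction suf with
  | nil => intro pre flag; rw [aLoop]; simp
  | cons c t ih =>
    intro pre flag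
    rw [aLoop]
    have hlen : pre.length < (pre ++ c :: t).length := by simp
    have hget : (pre ++ c :: t)[pre.length]'hlen = c := by
      simp [List.getElem_append_right]
    simp only [hlen, dif_pos, hget]
    by_cases hc : c = '"'
    · subst hc
      rw [if_pos rfl, if_pos (by norm_num : (0:Nat) + 1 ≤ 2), takeDropMid,
          if_neg (by norm_num : ¬ (0:Nat) + 1 = 2),
          show (0:Nat) + 1 = 1 by norm_num, aLoop_one t pre flag]
      simp [List.dropWhile_cons, List.takeWhile_cons]
    · rw [if_neg hc, if_neg (by rintro ⟨_, h0⟩; omega)]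
      have h1 := ih (pre ++ [c]) flag
      simp only [List.append_assoc, List.singleton_append, List.length_append,
        List.length_singleton] at h1
      simp only [ne_eq, decide_not] at h1 ⊢
      rw [h1]
      cases hdw : t.dropWhile (fun x => !decide (x = '"')) with
      | nil => simp [List.dropWhile_cons, hc, hdw]
      | cons q r => simp [List.dropWhile_cons, List.takeWhile_cons, hc, hdw]

-- replace.go on a one-char pattern that does not occur is a no-op
lemma replace_go_nop : ∀ (fuel : Nat) (l acc : List Char), '"' ∉ l →
    PySem.Chars.replace.go ['"'] ['"', ' '] fuel l acc = acc.reverse ++ l := by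
  intro fuel
  induction fuel with
  | zero => intro l acc _; rw [PySem.Chars.replace.go]
  | succ n ih =>
    intro l acc hl
    cases l with
    | nil => rw [PySem.Chars.replace.go]; simp; omega
    | cons c t =>
      rw [PySem.Chars.replace.go]
      have hc : c ≠ '"' := fun h => hl (h ▸ List.mem_cons_self)
      have hpre : (['"'] : List Char).isPrefixOf (c :: t) = false := by
        simp [List.isPrefixOf]; exact fun h => hc h.symm
      simp only [hpre]
      rw [ih t (c :: acc) (fun h => hl (List.mem_cons_of_mem _ h))]
      simp

lemma replace_nop (cs : List Char) (h : '"' ∉ cs) :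
    PySem.Chars.replace cs ['"'] ['"', ' '] = cs := by
  rw [PySem.Chars.replace]
  simp only [List.isEmpty_cons, if_false]
  rw [replace_go_nop cs.length cs [] h]
  simp

-- strip s = [] means every character is whitespace (hence no '"')
lemma strip_nil_all_space (cs : List Char) (h : PySem.Chars.strip cs = []) :
    ∀ c ∈ cs, PySem.Chars.isspace c = true := by
  unfold PySem.Chars.strip PySem.Chars.rstrip PySem.Chars.lstrip at h
  have h1 : (cs.dropWhile PySem.Chars.isspace).reverse.dropWhile PySem.Chars.isspace = [] := by
    have := congrArg List.reverse h
    simpa using this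
  rw [List.dropWhile_eq_nil_iff] at h1
  intro c hc
  have : c ∈ cs.takeWhile PySem.Chars.isspace ∨ c ∈ cs.dropWhile PySem.Chars.isspace := by
    rw [← List.mem_append, List.takeWhile_append_dropWhile]; exact hc
  rcases this with h2 | h2
  · exact List.mem_takeWhile_imp h2
  · exact h1 c (List.mem_reverse.mpr h2)

-- ===== VERDICT (by name: the statement is the Claim_ definition above) =====
theorem remove_quotes_and_commas_from_title_spec : Claim_equal_remove_quotes_and_commas_from_title := by
  intro line _
  unfold Spec_remove_quotes_and_commas_from_title
  unfold remove_quotes_and_commas_from_title remove_quotes_and_commas_from_title_alt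
  by_cases hs : PySem.Chars.strip line.toList = []
  · -- whitespace-only line: no quote, both return line
    simp only [hs, ne_eq, not_true_eq_false, if_false]
    have hnq : line.toList.dropWhile (· ≠ '"') = [] := by
      rw [List.dropWhile_eq_nil_iff]
      intro c hc
      have := strip_nil_all_space line.toList hs c hc
      simp only [decide_eq_true_eq]
      intro hq
      rw [hq] at this
      simp [PySem.Chars.isspace] at this
    rw [hnq]
  · simp only [ne_eq, hs, not_false_eq_true, if_true]
    have h0 : aLoop line.toList 0 0 false = aLoop (([] : List Char) ++ line.toList) ([] : List Char).length 0 false := by simp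
    rw [h0, aLoop_zero line.toList [] false]
    cases hdw : line.toList.dropWhile (· ≠ '"') with
    | nil =>
      -- no quote at all: loop leaves the line intact, flag false
      simp only [List.nil_append]
      simp [String.ofList_toList]
    | cons q rest =>
      simp only [List.nil_append]
      by_cases hf : (phase1 rest false).2 = true
      · -- one quote, commas after it removed, no second quote: result contains no '"',
        -- so A's trailing replace is a no-op
        simp only [hf, if_true]
        unfold phase1 at hf
        by_cases hr2 : rest.dropWhile (· ≠ '"') = []
        · have hrest : ∀ c ∈ rest, c ≠ '"' := by
            rw [List.dropWhile_eq_nil_iff] at hr2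
            intro c hc; simpa using hr2 c hc
          have hnq : '"' ∉ line.toList.takeWhile (· ≠ '"') ++
              ((phase1 rest false).1) := by
            unfold phase1
            rw [hr2]
            simp only [List.drop_nil, List.append_nil, List.mem_append]
            rintro (h1 | h1)
            · have := List.mem_takeWhile_imp h1; simp at this
            · have h2 := List.mem_filter.mp h1
              have := List.mem_takeWhile_imp h2.1
              simp at this
          rw [replace_nop _ hnq]
          unfold phase1
          rw [hr2]
          simp
        · rw [if_neg hr2] at hf
          simp at hf
      · simp only [Bool.not_eq_true] at hf
        simp only [hf, if_false]
        unfold phase1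
        simp
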